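-- pv_equiv track=rewrite | github.com/romeorizzi/portafoglioVoti_public | Algoritmi/2019-02-26/all-CMS-submissions/2019-02-26.10:06:44.735612.VR424867.bit_edit_to_zero.py | nmosse
-- ===== SOURCE A (Python) =====
-- def lsp(n):
--     return n & (-n)
--
-- def numero_uni(n):
--     if n == 0:
--         return 0
--     return 1 + numero_uni(n - lsp(n))
--
-- def nmosse(n):
--     risp=0
--     while n!=0:
--         risp += 1
--         if numero_uni(n)%2 ==1:
--             if n%2 ==1:
--                 n=n-1
--             else:
--                 n=n+1
--         else:
--             if lsp(n-lsp(n))==2*lsp(n):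
--                 n=n-2*lsp(n)
--             else:
--                 n=n+2*lsp(n)
--     return risp
-- ===== SOURCE B (Python) =====
-- def nmosse(n):
--     # inverse Gray code: the move count is n ^ (n>>1) ^ (n>>2) ^ ...
--     risp = 0
--     while n != 0:
--         risp ^= n
--         n >>= 1
--     return risp
-- ===== Notes on version B (the rewrite author's own statement) =====
-- stated objective: faster
-- what changed: A simulates every single-bit move one by one (with a recursive popcount at each step), taking a number of iterations equal to the answer itself (~n); B computes the answer directly as the inverse Gray code of n by XOR-folding the right shifts of n.
import Mathlib
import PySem

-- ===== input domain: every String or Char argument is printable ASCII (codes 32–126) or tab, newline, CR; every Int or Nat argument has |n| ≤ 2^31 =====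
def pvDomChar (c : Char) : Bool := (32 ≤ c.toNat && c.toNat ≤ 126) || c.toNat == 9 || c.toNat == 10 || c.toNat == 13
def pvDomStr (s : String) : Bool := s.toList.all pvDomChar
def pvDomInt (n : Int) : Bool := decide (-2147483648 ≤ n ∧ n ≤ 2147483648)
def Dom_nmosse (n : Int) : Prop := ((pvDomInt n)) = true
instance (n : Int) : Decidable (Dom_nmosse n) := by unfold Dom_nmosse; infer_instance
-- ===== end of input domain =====

-- B replaces A's move-by-move simulation (one loop iteration per move, a recursive
-- popcount at every step) by the closed-form inverse Gray code, XOR-folding n with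
-- its right shifts; equal on every non-negative input (on negative inputs the Python A never returns:
-- unbounded recursion in numero_uni; those inputs are excluded by Pre_).

-- ===== PORT A =====
def lsp (n : Int) : Int := Int.land n (-n)

-- fuel only makes the recursion `n → n - lsp n` total; n.natAbs + 1 steps always suffice on Pre_
def numeroUniFuel : Nat → Int → Int
  | 0, _ => 0
  | f+1, n => if n = 0 then 0 else 1 + numeroUniFuel f (n - lsp n)

def numero_uni (n : Int) : Int := numeroUniFuel (n.natAbs + 1) n

-- fuel only makes the while-loop total; 2*n.natAbs + 1 iterations always suffice on Pre_
def nmosseLoop : Nat → Int → Int → Int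
  | 0, risp, _ => risp
  | f+1, risp, n =>
    if n = 0 then risp
    else
      if numero_uni n % 2 = 1 then
        (if n % 2 = 1 then nmosseLoop f (risp + 1) (n - 1)
         else nmosseLoop f (risp + 1) (n + 1))
      else
        (if lsp (n - lsp n) = 2 * lsp n then nmosseLoop f (risp + 1) (n - 2 * lsp n)
         else nmosseLoop f (risp + 1) (n + 2 * lsp n))

def nmosse (n : Int) : Int := nmosseLoop (2 * n.natAbs + 1) 0 n

-- ===== PORT B =====
-- fuel only makes the while-loop total; n.natAbs + 1 iterations always suffice on Pre_
def nmosseAltLoop : Nat → Int → Int → Int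
  | 0, risp, _ => risp
  | f+1, risp, n =>
    if n = 0 then risp
    else nmosseAltLoop f (Int.xor risp n) (Int.shiftRight n 1)

def nmosse_alt (n : Int) : Int := nmosseAltLoop (n.natAbs + 1) 0 n

-- ===== PRECONDITION & SPEC =====
-- Pre_ excludes negative inputs, on which Python A never returns (unbounded recursion in numero_uni)
def Pre_nmosse (n : Int) : Prop := 0 ≤ n
instance (n : Int) : Decidable (Pre_nmosse n) := by unfold Pre_nmosse; infer_instance
def pvWitness_nmosse : Int := (6)
def Spec_nmosse (n : Int) (out : Int) : Prop := out = nmosse_alt n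
instance (n : Int) (out : Int) : Decidable (Spec_nmosse n out) := by unfold Spec_nmosse; infer_instance

-- ===== CLAIM (what is proved, stated in full; the proofs are below) =====
def Claim_equal_nmosse : Prop := ∀ (n : Int), Dom_nmosse n → Pre_nmosse n → Spec_nmosse n (nmosse n)

-- ===== LEMMAS AND PROOFS =====

-- Nat-level models used only by the proofs: pc = popcount, GA = inverse Gray code
-- (arithmetic recursion), Gx = inverse Gray code (xor-fold recursion, B's shape),
-- lspN = lowest set bit, stepN = one iteration of A's loop.
def pc (n : Nat) : Nat := if n = 0 then 0 else pc (n / 2) + n % 2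
  decreasing_by omega

def GA (n : Nat) : Nat := if n = 0 then 0 else 2 * GA (n / 2) + ((n % 2 + pc (n / 2)) % 2)
  decreasing_by omega

def Gx (n : Nat) : Nat := if n = 0 then 0 else n ^^^ Gx (n / 2)
  decreasing_by omega

def lspN (n : Nat) : Nat := Nat.ldiff n (n - 1)

def stepN (k : Nat) : Nat :=
  if pc k % 2 = 1 then (if k % 2 = 1 then k - 1 else k + 1)
  else if lspN (k - lspN k) = 2 * lspN k then k - 2 * lspN k else k + 2 * lspN k

lemma pc_zero : pc 0 = 0 := by simp [pc]

lemma pc_two_mul (m : Nat) : pc (2 * m) = pc m := by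
  by_cases h : m = 0
  · simp [h, pc_zero]
  · rw [pc, if_neg (by omega : ¬ 2 * m = 0),
        show 2 * m % 2 = 0 by omega, show 2 * m / 2 = m by omega, Nat.add_zero]

lemma pc_two_mul_add_one (m : Nat) : pc (2 * m + 1) = pc m + 1 := by
  rw [pc, if_neg (by omega : ¬ 2 * m + 1 = 0),
      show (2 * m + 1) % 2 = 1 by omega, show (2 * m + 1) / 2 = m by omega]

lemma GA_zero : GA 0 = 0 := by simp [GA]

lemma GA_two_mul (m : Nat) : GA (2 * m) = 2 * GA m + pc m % 2 := by
  by_cases h : m = 0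
  · simp [h, GA_zero, pc_zero]
  · rw [GA, if_neg (by omega : ¬ 2 * m = 0),
        show 2 * m % 2 = 0 by omega, show 2 * m / 2 = m by omega, Nat.zero_add]

lemma GA_two_mul_add_one (m : Nat) : GA (2 * m + 1) = 2 * GA m + (1 + pc m) % 2 := by
  rw [GA, if_neg (by omega : ¬ 2 * m + 1 = 0),
      show (2 * m + 1) % 2 = 1 by omega, show (2 * m + 1) / 2 = m by omega]

lemma GA_mod_two (k : Nat) : GA k % 2 = pc k % 2 := by
  by_cases h : k = 0
  · simp [h, GA_zero, pc_zero]
  · conv_rhs => rw [pc]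
    rw [if_neg h, GA, if_neg h]
    omega

lemma GA_eq_zero (k : Nat) : GA k = 0 ↔ k = 0 := by
  induction k using Nat.strong_induction_on with
  | _ k IH =>
    constructor
    · intro h
      by_contra hk
      rw [GA, if_neg hk] at h
      have h1 : GA (k / 2) = 0 := by omega
      have h2 : k / 2 = 0 := (IH (k / 2) (by omega)).mp h1
      have h3 : k = 1 := by omega
      rw [h2, GA_zero, pc_zero] at h
      omega
    · intro h; rw [h, GA_zero]

lemma GA_lt (k : Nat) (hk : k ≠ 0) : GA k < 2 * k := by
  induction k using Nat.strong_induction_on with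
  | _ k IH =>
    rw [GA, if_neg hk]
    by_cases h2 : k / 2 = 0
    · rw [h2, GA_zero, pc_zero]
      omega
    · have := IH (k / 2) (by omega) h2
      omega

lemma GA_le (k : Nat) : GA k ≤ 2 * k := by
  by_cases h : k = 0
  · simp [h, GA_zero]
  · have := GA_lt k h
    omega

-- lspN equations (bit-level facts about n & -n, by testBit extensionality)
lemma ldiff_zero_left (n : Nat) : Nat.ldiff 0 n = 0 := by
  apply Nat.eq_of_testBit_eq
  intro i
  rw [Nat.testBit_ldiff]
  simp [Nat.zero_testBit]

lemma lspN_zero : lspN 0 = 0 := by rw [lspN, ldiff_zero_left]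

lemma lspN_odd (m : Nat) : lspN (2 * m + 1) = 1 := by
  apply Nat.eq_of_testBit_eq
  intro i
  cases i with
  | zero =>
    rw [lspN, Nat.testBit_ldiff, Nat.testBit_zero, Nat.testBit_zero, Nat.testBit_zero]
    simp
  | succ i =>
    rw [lspN, Nat.testBit_ldiff,
        show 2 * m + 1 - 1 = 2 * m by omega,
        Nat.testBit_succ, Nat.testBit_succ, Nat.testBit_succ,
        show (2 * m + 1) / 2 = m by omega, show 2 * m / 2 = m by omega,
        show (1:Nat) / 2 = 0 by omega, Nat.zero_testBit, Bool.and_not_self]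

lemma lspN_even (m : Nat) : lspN (2 * m) = 2 * lspN m := by
  by_cases hm : m = 0
  · subst hm; rw [show 2 * 0 = 0 by omega, lspN_zero]
  apply Nat.eq_of_testBit_eq
  intro i
  cases i with
  | zero =>
    rw [lspN, Nat.testBit_ldiff, Nat.testBit_zero, Nat.testBit_zero, Nat.testBit_zero]
    simp
  | succ i =>
    rw [lspN, Nat.testBit_ldiff,
        Nat.testBit_succ, Nat.testBit_succ, Nat.testBit_succ,
        show (2 * m) / 2 = m by omega, show (2 * m - 1) / 2 = m - 1 by omega,
        show (2 * lspN m) / 2 = lspN m by omega,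
        lspN, Nat.testBit_ldiff]

lemma lspN_le (k : Nat) : lspN k ≤ k := by
  induction k using Nat.strong_induction_on with
  | _ k IH =>
    by_cases hk : k = 0
    · subst hk; rw [lspN_zero]
    rcases Nat.even_or_odd k with ⟨m, hm⟩ | ⟨m, hm⟩
    · have hm' : k = 2 * m := by omega
      subst hm'
      rw [lspN_even]
      have := IH m (by omega)
      omega
    · subst hm
      rw [lspN_odd]; omega

lemma lspN_pos (k : Nat) (hk : k ≠ 0) : 0 < lspN k := by
  induction k using Nat.strong_induction_on with
  | _ k IH =>
    rcases Nat.even_or_odd k with ⟨m, hm⟩ | ⟨m, hm⟩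
    · have hm' : k = 2 * m := by omega
      subst hm'
      rw [lspN_even]
      have := IH m (by omega) (by omega)
      omega
    · subst hm
      rw [lspN_odd]; omega

lemma pc_sub_lsp (k : Nat) (hk : k ≠ 0) : pc (k - lspN k) + 1 = pc k := by
  induction k using Nat.strong_induction_on with
  | _ k IH =>
    rcases Nat.even_or_odd k with ⟨m, hm⟩ | ⟨m, hm⟩
    · have hm' : k = 2 * m := by omega
      subst hm'
      have hm0 : m ≠ 0 := by omega
      rw [lspN_even, pc_two_mul, show 2 * m - 2 * lspN m = 2 * (m - lspN m) by omega,
          pc_two_mul]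
      exact IH m (by omega) hm0
    · subst hm
      rw [lspN_odd, show 2 * m + 1 - 1 = 2 * m by omega, pc_two_mul, pc_two_mul_add_one]

-- how stepN acts on even/odd arguments
lemma stepN_odd_podd (m : Nat) (h : pc m % 2 = 0) : stepN (2 * m + 1) = 2 * m := by
  rw [stepN, pc_two_mul_add_one, if_pos (by omega : (pc m + 1) % 2 = 1),
      if_pos (by omega : (2 * m + 1) % 2 = 1)]
  omega

lemma stepN_odd_peven (m : Nat) (h : pc m % 2 = 1) : stepN (2 * m + 1) = 2 * stepN m + 1 := by
  have hm : m ≠ 0 := by intro e; subst e; rw [pc_zero] at h; omega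
  rw [stepN, pc_two_mul_add_one, if_neg (by omega : ¬ (pc m + 1) % 2 = 1), lspN_odd,
      show 2 * m + 1 - 1 = 2 * m by omega, lspN_even]
  rcases Nat.even_or_odd m with ⟨t, ht⟩ | ⟨t, ht⟩
  · have ht' : m = 2 * t := by omega
    subst ht'
    have ht0 : t ≠ 0 := by omega
    rw [lspN_even]
    have := lspN_pos t ht0
    rw [if_neg (by omega : ¬ 2 * (2 * lspN t) = 2 * 1)]
    rw [stepN, if_pos h, if_neg (by omega : ¬ 2 * t % 2 = 1)]
    omega
  · subst ht
    rw [lspN_odd, if_pos (by omega : 2 * 1 = 2 * 1)]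
    rw [stepN, if_pos h, if_pos (by omega : (2 * t + 1) % 2 = 1)]
    omega

lemma stepN_even_podd (m : Nat) (h : pc m % 2 = 1) : stepN (2 * m) = 2 * m + 1 := by
  rw [stepN, pc_two_mul, if_pos h, if_neg (by omega : ¬ 2 * m % 2 = 1)]

lemma stepN_even_peven (m : Nat) (_hm : m ≠ 0) (h : pc m % 2 = 0) :
    stepN (2 * m) = 2 * stepN m := by
  rw [stepN, pc_two_mul, if_neg (by omega : ¬ pc m % 2 = 1), lspN_even,
      show 2 * m - 2 * lspN m = 2 * (m - lspN m) by omega, lspN_even]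
  rw [stepN, if_neg (by omega : ¬ pc m % 2 = 1)]
  by_cases h2 : lspN (m - lspN m) = 2 * lspN m
  · rw [if_pos (by omega : 2 * lspN (m - lspN m) = 2 * (2 * lspN m)), if_pos h2]
    have h3 := lspN_le (m - lspN m)
    have h4 := lspN_le m
    omega
  · rw [if_neg (by omega : ¬ 2 * lspN (m - lspN m) = 2 * (2 * lspN m)), if_neg h2]
    omega

-- the key step lemma: one iteration of A's loop decreases the inverse Gray code by 1
lemma stepA (k : Nat) (hk : k ≠ 0) : GA (stepN k) + 1 = GA k := by
  induction k using Nat.strong_induction_on with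
  | _ k IH =>
    rcases Nat.even_or_odd k with ⟨m, hm⟩ | ⟨m, hm⟩
    · have hm' : k = 2 * m := by omega
      subst hm'
      have hm0 : m ≠ 0 := by omega
      by_cases hp : pc m % 2 = 1
      · rw [stepN_even_podd m hp, GA_two_mul_add_one m, GA_two_mul m]
        omega
      · rw [stepN_even_peven m hm0 (by omega), GA_two_mul (stepN m), GA_two_mul m]
        have IHm := IH m (by omega) hm0
        have h1 := GA_mod_two (stepN m)
        have h2 := GA_mod_two m
        have h3 : GA m ≠ 0 := fun e => hm0 ((GA_eq_zero m).mp e)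
        omega
    · subst hm
      by_cases hp : pc m % 2 = 1
      · rw [stepN_odd_peven m hp, GA_two_mul_add_one (stepN m), GA_two_mul_add_one m]
        have hm0 : m ≠ 0 := by intro e; subst e; rw [pc_zero] at hp; omega
        have IHm := IH m (by omega) hm0
        have h1 := GA_mod_two (stepN m)
        have h2 := GA_mod_two m
        have h3 : GA m ≠ 0 := fun e => hm0 ((GA_eq_zero m).mp e)
        omega
      · rw [stepN_odd_podd m (by omega), GA_two_mul m, GA_two_mul_add_one m]
        omega

-- Gx (B's xor-fold) equals GA
lemma bit_xor (x y : Nat) (hx : x < 2) (hy : y < 2) : x ^^^ y = (x + y) % 2 := by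
  interval_cases x <;> interval_cases y <;> simp

lemma xor_split (a b x y : Nat) (hx : x < 2) (hy : y < 2) :
    (2 * a + x) ^^^ (2 * b + y) = 2 * (a ^^^ b) + (x ^^^ y) := by
  have hxy : x ^^^ y < 2 := by interval_cases x <;> interval_cases y <;> simp
  apply Nat.eq_of_testBit_eq
  intro i
  cases i with
  | zero =>
    rw [Nat.testBit_zero, Nat.testBit_zero, Nat.xor_mod_two_eq,
        bit_xor x y hx hy, decide_eq_decide]
    omega
  | succ i =>
    rw [Nat.testBit_xor, Nat.testBit_succ, Nat.testBit_succ, Nat.testBit_succ,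
        show (2 * a + x) / 2 = a by omega, show (2 * b + y) / 2 = b by omega,
        show (2 * (a ^^^ b) + (x ^^^ y)) / 2 = a ^^^ b by omega,
        Nat.testBit_xor]

lemma GA_div_two (k : Nat) : GA k / 2 = GA (k / 2) := by
  by_cases h : k = 0
  · simp [h, GA_zero]
  · rw [GA, if_neg h]; omega

lemma Gx_eq_GA (k : Nat) : Gx k = GA k := by
  induction k using Nat.strong_induction_on with
  | _ k IH =>
    by_cases h : k = 0
    · simp [h, Gx, GA_zero]
    · have hGA : GA k = 2 * GA (k / 2) + ((k % 2 + pc (k / 2)) % 2) := by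
        conv_lhs => rw [GA]
        rw [if_neg h]
      have hq : GA (k / 2) = 2 * GA (k / 2 / 2) + GA (k / 2) % 2 := by
        have := GA_div_two (k / 2)
        omega
      have h1 : (k / 2) ^^^ GA (k / 2 / 2) = GA (k / 2) := by
        by_cases hq0 : k / 2 = 0
        · simp [hq0, GA_zero]
        · have e1 : Gx (k / 2) = (k / 2) ^^^ Gx (k / 2 / 2) := by
            conv_lhs => rw [Gx]
            rw [if_neg hq0]
          rw [← IH (k / 2 / 2) (by omega), ← e1, IH (k / 2) (by omega)]
      conv_lhs => rw [Gx]
      rw [if_neg h, IH (k / 2) (by omega)]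
      calc k ^^^ GA (k / 2)
          = (2 * (k / 2) + k % 2) ^^^ (2 * GA (k / 2 / 2) + GA (k / 2) % 2) := by
            rw [← hq, show 2 * (k / 2) + k % 2 = k by omega]
        _ = 2 * ((k / 2) ^^^ GA (k / 2 / 2)) + ((k % 2) ^^^ (GA (k / 2) % 2)) := by
            apply xor_split <;> omega
        _ = GA k := by
            rw [h1, GA_mod_two, bit_xor (k % 2) (pc (k / 2) % 2) (by omega) (by omega), hGA]
            omega

-- cast bridges between the Int-level ports and the Nat-level models
lemma lsp_cast (k : Nat) : lsp (k : Int) = (lspN k : Int) := by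
  cases k with
  | zero =>
    show Int.land 0 (-0) = (lspN 0 : Int)
    rw [lspN_zero]
    rfl
  | succ j =>
    show Int.land (Int.ofNat (j + 1)) (-(Int.ofNat (j + 1))) = _
    rw [show -(Int.ofNat (j + 1)) = Int.negSucc j from rfl]
    show (Nat.ldiff (j + 1) j : Int) = (lspN (j + 1) : Int)
    rw [lspN, show j + 1 - 1 = j by omega]

lemma numeroUniFuel_cast (f : Nat) : ∀ k : Nat, k ≤ f → numeroUniFuel f (k : Int) = (pc k : Int) := by
  induction f with
  | zero =>
    intro k hk
    have : k = 0 := by omega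
    subst this
    simp [numeroUniFuel, pc_zero]
  | succ f IH =>
    intro k hk
    by_cases h : k = 0
    · subst h; simp [numeroUniFuel, pc_zero]
    · rw [numeroUniFuel, if_neg (by exact_mod_cast h), lsp_cast]
      have hle := lspN_le k
      have hpos := lspN_pos k h
      rw [show (k : Int) - (lspN k : Int) = ((k - lspN k : Nat) : Int) by omega]
      rw [IH (k - lspN k) (by omega)]
      have := pc_sub_lsp k h
      omega

lemma numero_uni_cast (k : Nat) : numero_uni (k : Int) = (pc k : Int) := by
  rw [numero_uni, Int.natAbs_natCast]
  exact numeroUniFuel_cast (k + 1) k (by omega)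

-- one iteration of A's loop, on casts
lemma loopA_step (f : Nat) (r : Int) (k : Nat) (hk : k ≠ 0) :
    nmosseLoop (f + 1) r (k : Int) = nmosseLoop f (r + 1) ((stepN k : Nat) : Int) := by
  rw [nmosseLoop, if_neg (by exact_mod_cast hk), numero_uni_cast, stepN]
  by_cases h1 : pc k % 2 = 1
  · rw [if_pos (by omega : (pc k : Int) % 2 = 1), if_pos h1]
    by_cases h2 : k % 2 = 1
    · rw [if_pos (by omega : (k : Int) % 2 = 1), if_pos h2]
      congr 1
      omega
    · rw [if_neg (by omega : ¬ (k : Int) % 2 = 1), if_neg h2]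
      congr 1
  · rw [if_neg (by omega : ¬ (pc k : Int) % 2 = 1), if_neg h1, lsp_cast,
        show (k : Int) - (lspN k : Int) = ((k - lspN k : Nat) : Int) by
          have := lspN_le k; omega,
        lsp_cast]
    by_cases h2 : lspN (k - lspN k) = 2 * lspN k
    · rw [if_pos (by exact_mod_cast h2), if_pos h2]
      have hle : 2 * lspN k ≤ k := by
        have := lspN_le (k - lspN k)
        have := lspN_le k
        omega
      congr 1
      omega
    · rw [if_neg (by intro hc; exact h2 (by exact_mod_cast hc)), if_neg h2]
      congr 1

lemma loopA_val : ∀ g f k : Nat, ∀ r : Int, GA k = g → g ≤ f → nmosseLoop f r (k : Int) = r + g := by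
  intro g
  induction g with
  | zero =>
    intro f k r hg _
    have hk : k = 0 := (GA_eq_zero k).mp hg
    subst hk
    cases f with
    | zero => simp [nmosseLoop]
    | succ f =>
      rw [nmosseLoop, if_pos (by norm_num)]
      simp
  | succ g IH =>
    intro f k r hg hf
    have hk : k ≠ 0 := by
      intro h; subst h; rw [GA_zero] at hg; omega
    obtain ⟨f', rfl⟩ : ∃ f', f = f' + 1 := ⟨f - 1, by omega⟩
    rw [loopA_step f' r k hk]
    have hstep : GA (stepN k) = g := by have := stepA k hk; omega
    rw [IH f' (stepN k) (r + 1) hstep (by omega)]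
    omega

-- B's loop computes the xor-fold Gx
lemma loopB_val : ∀ f k r : Nat, k ≤ f → nmosseAltLoop f (r : Int) (k : Int) = ((r ^^^ Gx k : Nat) : Int) := by
  intro f
  induction f with
  | zero =>
    intro k r hk
    have : k = 0 := by omega
    subst this
    simp [nmosseAltLoop, Gx]
  | succ f IH =>
    intro k r hk
    by_cases h : k = 0
    · subst h
      rw [nmosseAltLoop, if_pos (by norm_num)]
      simp [Gx]
    · rw [nmosseAltLoop, if_neg (by exact_mod_cast h)]
      have hxor : Int.xor (r : Int) (k : Int) = ((r ^^^ k : Nat) : Int) := rfl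
      have hshift : Int.shiftRight (k : Int) 1 = ((k / 2 : Nat) : Int) := by
        show Int.ofNat (k >>> 1) = _
        rw [Nat.shiftRight_one]
        rfl
      rw [hxor, hshift, IH (k / 2) (r ^^^ k) (by omega)]
      congr 1
      conv_rhs => rw [Gx]
      rw [if_neg h, Nat.xor_assoc]

-- ===== VERDICT (by name: the statement is the Claim_ definition above) =====
theorem nmosse_spec : Claim_equal_nmosse := by
  intro n _ hpre
  obtain ⟨k, rfl⟩ : ∃ k : Nat, n = (k : Int) := ⟨n.toNat, (Int.toNat_of_nonneg hpre).symm⟩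
  show nmosse (k : Int) = nmosse_alt (k : Int)
  rw [nmosse, nmosse_alt, Int.natAbs_natCast,
      loopA_val (GA k) (2 * k + 1) k 0 rfl (by have := GA_le k; omega),
      show ((0 : Int)) = ((0 : Nat) : Int) from rfl,
      loopB_val (k + 1) k 0 (by omega),
      Nat.zero_xor, Gx_eq_GA]
  omega
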